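-- pv_equiv track=rewrite | github.com/mahmoudimus/.idapro | scripts/blzd/enckey_extractor.py | get_mem_symbol
-- ===== SOURCE A (Python) =====
-- def get_mem_symbol(operand: str) -> str:
--     """
--     Extracts a symbolic name from a memory operand.
--     E.g., from "[rsp+3F8h+var_380]" returns "var_380".
--     """
--     if "var_" in operand:
--         idx = operand.find("var_")
--         sym = operand[idx:]
--         for term in [" ", "]"]:
--             sym = sym.split(term)[0]
--         return sym
--     return operand
-- ===== SOURCE B (Python) =====
-- def get_mem_symbol(operand: str) -> str:
--     i = operand.find("var_")
--     if i < 0: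
--         return operand
--     out = []
--     for c in operand[i:]:
--         if c == " " or c == "]":
--             break
--         out.append(c)
--     return "".join(out)
-- ===== Notes on version B (the rewrite author's own statement) =====
-- stated objective: simpler
-- what changed: replaces the membership test plus slice plus two split passes with one find and a single character scan that stops at the first delimiter character
import Mathlib
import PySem

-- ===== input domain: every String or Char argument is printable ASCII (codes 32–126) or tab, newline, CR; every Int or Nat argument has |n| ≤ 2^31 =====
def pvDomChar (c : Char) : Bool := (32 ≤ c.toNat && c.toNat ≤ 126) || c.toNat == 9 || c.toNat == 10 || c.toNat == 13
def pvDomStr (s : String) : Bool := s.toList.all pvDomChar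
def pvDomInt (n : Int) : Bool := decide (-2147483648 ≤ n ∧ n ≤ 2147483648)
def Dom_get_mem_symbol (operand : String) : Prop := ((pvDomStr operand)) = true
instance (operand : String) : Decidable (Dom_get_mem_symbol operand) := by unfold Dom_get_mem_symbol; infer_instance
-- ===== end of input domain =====

-- B replaces A's membership test + slice + two split passes with one find and a single
-- character scan stopping at the first delimiter (objective: simpler).

-- ===== PORT A =====
-- literal transliteration of A: 'in' test, find, slice, then a loop over [" ", "]"]
-- taking sym.split(term)[0] (split never returns an empty list, so [0] is headD).
def get_mem_symbol (operand : String) : String :=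
  let s := operand.toList
  if PySem.Chars.isIn "var_".toList s then
    let idx := PySem.Chars.find s "var_".toList
    let sym := PySem.Chars.slice s (some idx) none
    let sym := [" ".toList, "]".toList].foldl
      (fun sym term => (PySem.Chars.splitOn sym term).headD []) sym
    String.ofList sym
  else operand

-- ===== PORT B =====
-- the 'for c in operand[i:]: if c == " " or c == "]": break; out.append(c)' loop of Source B
def pvScanSym : List Char → List Char
  | [] => []
  | c :: rest => if c = ' ' || c = ']' then [] else c :: pvScanSym rest

def get_mem_symbol_alt (operand : String) : String :=
  let s := operand.toList
  let i := PySem.Chars.find s "var_".toList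
  if i < 0 then operand
  else String.ofList (pvScanSym (PySem.List.slice s (some i) none))

-- ===== PRECONDITION & SPEC =====
def Spec_get_mem_symbol (operand : String) (out : String) : Prop := out = get_mem_symbol_alt operand
instance (operand : String) (out : String) : Decidable (Spec_get_mem_symbol operand out) := by unfold Spec_get_mem_symbol; infer_instance

-- ===== CLAIM (what is proved, stated in full; the proofs are below) =====
def Claim_equal_get_mem_symbol : Prop := ∀ (operand : String), Dom_get_mem_symbol operand → Spec_get_mem_symbol operand (get_mem_symbol operand)

-- ===== LEMMAS AND PROOFS =====

-- head of splitOn.go once the accumulator is nonempty is its (reversed) last element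
theorem pv_go_headD (c : Char) (d : List Char) :
    ∀ (fuel : Nat) (l cur acc : List Char) (x : List Char) (accs : List (List Char)),
      (PySem.Chars.splitOn.go [c] fuel l cur (accs ++ [x])).headD d = x := by
  intro fuel
  induction fuel with
  | zero =>
    intro l cur acc x accs
    simp [PySem.Chars.splitOn.go]
  | succ n ih =>
    intro l cur acc x accs
    cases l with
    | nil => simp [PySem.Chars.splitOn.go]
    | cons c' rest =>
      by_cases h : [c].isPrefixOf (c' :: rest) = true
      · simpa [PySem.Chars.splitOn.go, h] using
          ih (List.drop 1 (c' :: rest)) [] acc x (cur.reverse :: accs)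
      · simpa [PySem.Chars.splitOn.go, h] using ih rest (c' :: cur) acc x accs

theorem pv_go_head (c : Char) (d : List Char) :
    ∀ (fuel : Nat) (l cur : List Char), l.length ≤ fuel →
      (PySem.Chars.splitOn.go [c] fuel l cur []).headD d = cur.reverse ++ l.takeWhile (· ≠ c) := by
  intro fuel
  induction fuel with
  | zero =>
    intro l cur h
    have : l = [] := List.length_eq_zero_iff.mp (Nat.le_zero.mp h)
    subst this
    simp [PySem.Chars.splitOn.go]
  | succ n ih =>
    intro l cur h
    cases l with
    | nil => simp [PySem.Chars.splitOn.go]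
    | cons c' rest =>
      by_cases hc : c' = c
      · subst hc
        have hpre : [c'].isPrefixOf (c' :: rest) = true := by
          simp [List.isPrefixOf]
        have h3 := pv_go_headD c' d n rest [] [] cur.reverse []
        simp only [List.nil_append] at h3
        simp only [PySem.Chars.splitOn.go, hpre, if_true]
        simp [List.takeWhile]
        simpa using h3
      · have hpre : [c].isPrefixOf (c' :: rest) = false := by
          simp [List.isPrefixOf, hc]
          intro h'; exact absurd h'.symm hc
        have hlen : rest.length ≤ n := by simpa using Nat.succ_le_succ_iff.mp h
        rw [show (PySem.Chars.splitOn.go [c] (n+1) (c' :: rest) cur []) =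
            PySem.Chars.splitOn.go [c] n rest (c' :: cur) [] by
          simp [PySem.Chars.splitOn.go, hpre]]
        rw [ih rest (c' :: cur) hlen]
        simp [List.takeWhile, hc]

theorem pv_splitOn_head (t : List Char) (c : Char) (d : List Char) :
    (PySem.Chars.splitOn t [c]).headD d = t.takeWhile (· ≠ c) := by
  have := pv_go_head c d (t.length + 1) t [] (by omega)
  simpa [PySem.Chars.splitOn] using this

theorem pv_scan_eq (t : List Char) :
    pvScanSym t = (t.takeWhile (· ≠ ' ')).takeWhile (· ≠ ']') := by
  induction t with
  | nil => simp [pvScanSym]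
  | cons c rest ih =>
    by_cases h1 : c = ' '
    · simp [pvScanSym, h1, List.takeWhile]
    · by_cases h2 : c = ']'
      · simp [pvScanSym, h1, h2, List.takeWhile]
      · simp [pvScanSym, h1, h2, List.takeWhile, ih]

-- ===== VERDICT (by name: the statement is the Claim_ definition above) =====
theorem get_mem_symbol_spec : Claim_equal_get_mem_symbol := by
  intro operand _
  unfold Spec_get_mem_symbol get_mem_symbol get_mem_symbol_alt
  by_cases hin : PySem.Chars.isIn "var_".toList operand.toList = true
  · have hpos : 0 ≤ PySem.Chars.find operand.toList "var_".toList :=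
      (PySem.Chars.find_nonneg_iff _ _).mpr ((PySem.Chars.isIn_iff_infix _ _).mp hin)
    rw [if_pos hin, if_neg (by omega)]
    rw [pv_scan_eq]
    have h1 : (" ".toList : List Char) = [' '] := by decide
    have h2 : ("]".toList : List Char) = [']'] := by decide
    simp only [List.foldl, h1, h2, pv_splitOn_head, PySem.Chars.slice_eq_listSlice]
  · have hneg : PySem.Chars.find operand.toList "var_".toList < 0 := by
      have h4 : ¬ 0 ≤ PySem.Chars.find operand.toList "var_".toList := fun h =>
        hin ((PySem.Chars.isIn_iff_infix _ _).mpr ((PySem.Chars.find_nonneg_iff _ _).mp h))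
      omega
    rw [if_neg hin, if_pos hneg]
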